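-- pv_equiv track=rewrite | github.com/tychurch74/Chatbot-Context-Window-Extension-via-Summarization-Model | src/modules/long_term_storage.py | remove_additional_system_dicts
-- ===== SOURCE A (Python) =====
-- def remove_additional_system_dicts(data):
--     seen_system = False
--     result = []
--
--     for d in data:
--         if d.get('role') == 'system':
--             if not seen_system:
--                 seen_system = True
--                 result.append(d)
--         else:
--             result.append(d)
--
--     return result
-- ===== SOURCE B (Python) =====
-- def remove_additional_system_dicts(data):
--     first = next((i for i, d in enumerate(data) if d.get('role') == 'system'), None)
--     return [d for i, d in enumerate(data) if d.get('role') != 'system' or i == first]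
-- ===== Notes on version B (the rewrite author's own statement) =====
-- stated objective: alternative
-- what changed: Replaces the running seen_system flag loop with a two-pass index-then-filter structure: first locate the index of the first system dict, then keep every element that is not a system dict or sits at that index.
import Mathlib
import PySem

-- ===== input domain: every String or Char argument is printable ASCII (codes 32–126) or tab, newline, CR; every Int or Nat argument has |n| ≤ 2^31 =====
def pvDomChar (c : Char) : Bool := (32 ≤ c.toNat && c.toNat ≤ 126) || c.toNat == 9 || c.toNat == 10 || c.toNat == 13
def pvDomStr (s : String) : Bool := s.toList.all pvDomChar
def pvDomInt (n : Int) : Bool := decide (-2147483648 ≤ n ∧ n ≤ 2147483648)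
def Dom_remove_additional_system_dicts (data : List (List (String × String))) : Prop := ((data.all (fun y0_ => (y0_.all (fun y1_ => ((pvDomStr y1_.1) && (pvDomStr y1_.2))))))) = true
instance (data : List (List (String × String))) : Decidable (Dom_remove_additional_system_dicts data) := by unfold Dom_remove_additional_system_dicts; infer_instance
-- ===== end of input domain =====

-- B is an alternative decomposition (index-then-filter two passes) of A's one-pass seen-flag loop; same cost.

-- shared helper: d.get('role') == 'system'
def pvIsSys (d : List (String × String)) : Bool := (PySem.Dict.mk d).get? "role" == some "system"

-- ===== PORT A =====
-- one pass with a seen_system flag in the fold state, appending kept dicts to result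
def pvStepA (st : Bool × List (List (String × String))) (d : List (String × String)) :
    Bool × List (List (String × String)) :=
  if pvIsSys d then
    if !st.1 then (true, st.2 ++ [d]) else st
  else
    (st.1, st.2 ++ [d])

def remove_additional_system_dicts (data : List (List (String × String))) : List (List (String × String)) :=
  (data.foldl pvStepA (false, ([] : List (List (String × String))))).2

-- ===== PORT B =====
-- first = index of the first system dict (None if absent); keep non-system dicts and the one at that index
def remove_additional_system_dicts_alt (data : List (List (String × String))) : List (List (String × String)) :=
  let first : Option Int := ((PySem.List.enumerate data 0).find? (fun p => pvIsSys p.2)).map (·.1)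
  ((PySem.List.enumerate data 0).filter (fun p => !pvIsSys p.2 || first == some p.1)).map (·.2)

-- ===== PRECONDITION & SPEC =====
def Spec_remove_additional_system_dicts (data : List (List (String × String))) (out : List (List (String × String))) : Prop := out = remove_additional_system_dicts_alt data
instance (data : List (List (String × String))) (out : List (List (String × String))) : Decidable (Spec_remove_additional_system_dicts data out) := by unfold Spec_remove_additional_system_dicts; infer_instance

-- ===== CLAIM (what is proved, stated in full; the proofs are below) =====
def Claim_equal_remove_additional_system_dicts : Prop := ∀ (data : List (List (String × String))), Dom_remove_additional_system_dicts data → Spec_remove_additional_system_dicts data (remove_additional_system_dicts data)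

-- ===== LEMMAS AND PROOFS =====

-- structural version of A's loop
def pvGoA : Bool → List (List (String × String)) → List (List (String × String))
  | _, [] => []
  | seen, d :: rest =>
    if pvIsSys d then
      if seen then pvGoA true rest else d :: pvGoA true rest
    else d :: pvGoA seen rest

-- generalized version of B with an arbitrary enumeration start
def pvGoB (s : Int) (xs : List (List (String × String))) : List (List (String × String)) :=
  let first : Option Int := ((PySem.List.enumerate xs s).find? (fun p => pvIsSys p.2)).map (·.1)
  ((PySem.List.enumerate xs s).filter (fun p => !pvIsSys p.2 || first == some p.1)).map (·.2)

theorem pvFoldlA (xs : List (List (String × String))) :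
    ∀ (seen : Bool) (acc : List (List (String × String))),
    (xs.foldl pvStepA (seen, acc)).2 = acc ++ pvGoA seen xs := by
  induction xs with
  | nil => intro seen acc; simp [pvGoA]
  | cons d rest ih =>
    intro seen acc
    rw [List.foldl_cons]
    by_cases h : pvIsSys d = true
    · cases seen with
      | false =>
        have hstep : pvStepA (false, acc) d = (true, acc ++ [d]) := by simp [pvStepA, h]
        rw [hstep, ih]; simp [pvGoA, h]
      | true =>
        have hstep : pvStepA (true, acc) d = (true, acc) := by simp [pvStepA, h]
        rw [hstep, ih]; simp [pvGoA, h]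
    · have hstep : pvStepA (seen, acc) d = (seen, acc ++ [d]) := by simp [pvStepA, h]
      rw [hstep, ih]; simp [pvGoA, h]

theorem pvGoA_true (xs : List (List (String × String))) :
    pvGoA true xs = xs.filter (fun d => !pvIsSys d) := by
  induction xs with
  | nil => rfl
  | cons d rest ih =>
    by_cases h : pvIsSys d = true <;> simp [pvGoA, h, ih]

theorem pvFilterSnd (xs : List (List (String × String))) :
    ∀ (t : Int),
    ((PySem.List.enumerate xs t).filter (fun p => !pvIsSys p.2)).map (·.2)
      = xs.filter (fun d => !pvIsSys d) := by
  induction xs with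
  | nil => intro t; simp [PySem.List.enumerate_nil]
  | cons d rest ih =>
    intro t
    by_cases h : pvIsSys d = true <;>
      simp [PySem.List.enumerate_cons, h, ih]

theorem pvGoB_eq_goA (xs : List (List (String × String))) :
    ∀ (s : Int), pvGoB s xs = pvGoA false xs := by
  induction xs with
  | nil => intro s; simp [pvGoB, pvGoA, PySem.List.enumerate_nil]
  | cons d rest ih =>
    intro s
    by_cases h : pvIsSys d = true
    · -- head is the first system dict: first = some s
      simp only [pvGoB, pvGoA, PySem.List.enumerate_cons, List.find?_cons, h,
        List.filter_cons]
      have hfilter :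
          (PySem.List.enumerate rest (s + 1)).filter
              (fun p => !pvIsSys p.2 || (some s == some p.1))
            = (PySem.List.enumerate rest (s + 1)).filter (fun p => !pvIsSys p.2) := by
        apply List.filter_congr
        intro p hp
        rw [PySem.List.mem_enumerate_iff] at hp
        rcases hp with ⟨k, hk, rfl⟩
        have : ¬ (s = s + 1 + (k : Int)) := by omega
        simp [this]
      simp only [Option.map_some, Bool.not_true, Bool.false_or, beq_self_eq_true,
        if_true, Bool.false_eq_true, if_false]
      rw [List.map_cons, hfilter, pvFilterSnd, ← pvGoA_true]
    · -- head not system: it is kept and the search continues in the tail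
      have hb : pvIsSys d = false := by simpa using h
      simp only [pvGoB, pvGoA, PySem.List.enumerate_cons, List.find?_cons, hb,
        List.filter_cons]
      simpa [pvGoB, hb] using ih (s + 1)

-- ===== VERDICT (by name: the statement is the Claim_ definition above) =====
theorem remove_additional_system_dicts_spec : Claim_equal_remove_additional_system_dicts := by
  intro data _
  show remove_additional_system_dicts data = remove_additional_system_dicts_alt data
  have hA : remove_additional_system_dicts data = pvGoA false data := by
    rw [remove_additional_system_dicts, pvFoldlA]; simp
  have hB : remove_additional_system_dicts_alt data = pvGoB 0 data := rfl
  rw [hA, hB, pvGoB_eq_goA]
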